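-- pv_equiv track=rewrite | github.com/Jong-hun-Park/trviz | trviz/utils.py | _calculate_cost
-- ===== SOURCE A (Python) =====
-- def get_levenshtein_distance(s1, s2):
--     """
--     This function takes two strings and returns the Levenshtein distance between them.
--     The Levenshtein distance is the minimum number of single-character edits (insertions, deletions or substitutions)
--     required to change one string into the other.
--     For example, the Levenshtein distance between "kitten" and "sitting" is 3, since the following three edits change
--     one into the other, and there is no way to do it with fewer than three edits:
--     kitten → sitten (substitution of "s" for "k")
--     sitten → sittin (substitution of "i" for "e")
--     """
--     if len(s1) > len(s2):
--         s1, s2 = s2, s1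
--
--     distances = range(len(s1) + 1)
--     for i2, c2 in enumerate(s2):
--         distances_ = [i2+1]
--         for i1, c1 in enumerate(s1):
--             if c1 == c2:
--                 distances_.append(distances[i1])
--             else:
--                 distances_.append(1 + min((distances[i1], distances[i1 + 1], distances_[-1])))
--         distances = distances_
--     return distances[-1]
--
-- def _calculate_cost(seq1, seq2, alphabet_to_motif):
--     if len(seq1) != len(seq2):
--         raise Exception("The length of two sequences should be identical.")
--
--     cost = 0
--     for i in range(len(seq1)):
--         if seq1[i] != seq2[i]:
--             # convert the motif to actual sequence
--             if seq1[i] != '-' and seq2[i] != '-':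
--                 s1 = alphabet_to_motif[seq1[i].lower()]
--                 s2 = alphabet_to_motif[seq2[i].lower()]
--                 cost += get_levenshtein_distance(s1, s2)
--             else:
--                 if seq1[i] == '-':
--                     cost += len(alphabet_to_motif[seq2[i].lower()])
--                 else:
--                     cost += len(alphabet_to_motif[seq1[i].lower()])
--     return cost
-- ===== SOURCE B (Python) =====
-- def _edit_distance(s1, s2):
--     memo = {}
--
--     def go(i, j):
--         if (i, j) in memo:
--             return memo[(i, j)]
--         if i == 0:
--             res = j
--         elif j == 0:
--             res = i
--         elif s1[i - 1] == s2[j - 1]: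
--             res = go(i - 1, j - 1)
--         else:
--             res = 1 + min(go(i - 1, j), go(i, j - 1), go(i - 1, j - 1))
--         memo[(i, j)] = res
--         return res
--
--     return go(len(s1), len(s2))
--
--
-- def _calculate_cost(seq1, seq2, alphabet_to_motif):
--     if len(seq1) != len(seq2):
--         raise Exception("The length of two sequences should be identical.")
--
--     cache = {}
--     total = 0
--     for c1, c2 in zip(seq1, seq2):
--         if c1 == c2:
--             continue
--         if (c1, c2) not in cache:
--             m1 = '' if c1 == '-' else alphabet_to_motif[c1.lower()]
--             m2 = '' if c2 == '-' else alphabet_to_motif[c2.lower()]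
--             cache[(c1, c2)] = _edit_distance(m1, m2)
--         total += cache[(c1, c2)]
--     return total
-- ===== Notes on version B (the rewrite author's own statement) =====
-- stated objective: faster
-- what changed: The bottom-up two-row Levenshtein tabulation is replaced by a top-down recursion memoized in a dict keyed on (i, j) (gaps become the uniform distance-to-empty case), and the outer index loop becomes a single pass over zipped character pairs with a per-pair cache so each distinct aligned column pair is computed once instead of once per position.
import Mathlib
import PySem

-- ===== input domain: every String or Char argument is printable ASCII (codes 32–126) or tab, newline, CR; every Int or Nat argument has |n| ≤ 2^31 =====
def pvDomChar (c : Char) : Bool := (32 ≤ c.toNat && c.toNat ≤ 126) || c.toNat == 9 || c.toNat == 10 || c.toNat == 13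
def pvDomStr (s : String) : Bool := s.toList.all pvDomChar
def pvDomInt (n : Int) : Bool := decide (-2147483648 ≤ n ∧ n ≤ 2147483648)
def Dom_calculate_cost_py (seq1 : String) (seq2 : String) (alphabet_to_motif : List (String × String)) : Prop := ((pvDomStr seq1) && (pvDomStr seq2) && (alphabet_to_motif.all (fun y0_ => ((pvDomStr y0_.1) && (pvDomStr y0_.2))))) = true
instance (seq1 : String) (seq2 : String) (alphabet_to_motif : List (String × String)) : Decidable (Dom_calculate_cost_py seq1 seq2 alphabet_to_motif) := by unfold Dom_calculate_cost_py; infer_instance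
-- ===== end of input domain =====

-- B replaces A's bottom-up two-row Levenshtein tabulation by top-down memoized recursion on index pairs
-- and adds a cache keyed on the aligned character pair, so each distinct column pair is computed once
-- instead of once per position (objective: faster; neither side mutates its arguments).

-- ===== PORT A =====
-- shared one-line helper: the dict key seq[i].lower() as a String
def pvKey (c : Char) : String := String.ofList (PySem.Chars.lower [c])

-- port of get_levenshtein_distance (bottom-up, two rolling rows, shorter string first)
def pvLevA (s1 s2 : List Char) : Int :=
  let p := if s1.length > s2.length then (s2, s1) else (s1, s2)
  let a := p.1
  let b := p.2
  let init : List Int := (List.range (a.length + 1)).map (fun i => Int.ofNat i)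
  let final := (PySem.List.enumerate b).foldl (fun distances ic =>
      (PySem.List.enumerate a).foldl (fun distances_ jc =>
          if jc.2 = ic.2 then
            distances_ ++ [PySem.List.pyGetD distances jc.1 0]
          else
            distances_ ++ [1 + min (PySem.List.pyGetD distances jc.1 0)
              (min (PySem.List.pyGetD distances (jc.1 + 1) 0)
                   (PySem.List.pyGetD distances_ (-1) 0))])
        [ic.1 + 1]) init
  PySem.List.pyGetD final (-1) 0

def calculate_cost_py (seq1 : String) (seq2 : String) (alphabet_to_motif : List (String × String)) : Int :=
  let l1 := seq1.toList
  let l2 := seq2.toList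
  let d : PySem.Dict String String := PySem.Dict.mk alphabet_to_motif
  (List.range l1.length).foldl (fun cost i =>
    let c1 := l1.getD i ' '
    let c2 := l2.getD i ' '
    if c1 ≠ c2 then
      if c1 ≠ '-' ∧ c2 ≠ '-' then
        cost + pvLevA ((d.get? (pvKey c1)).getD "").toList ((d.get? (pvKey c2)).getD "").toList
      else if c1 = '-' then
        cost + (((d.get? (pvKey c2)).getD "").toList.length : Int)
      else
        cost + (((d.get? (pvKey c1)).getD "").toList.length : Int)
    else cost) 0

-- ===== PORT B =====
-- top-down memoized edit distance on prefix lengths (i, j); memo threaded through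
def pvGo (s1 s2 : List Char) (i j : Nat) (memo : PySem.Dict (Nat × Nat) Int) :
    Int × PySem.Dict (Nat × Nat) Int :=
  match memo.get? (i, j) with
  | some v => (v, memo)
  | none =>
    if hi : i = 0 then
      ((j : Int), memo.insert (i, j) (j : Int))
    else if hj : j = 0 then
      ((i : Int), memo.insert (i, j) (i : Int))
    else if s1.getD (i - 1) ' ' = s2.getD (j - 1) ' ' then
      let r := pvGo s1 s2 (i - 1) (j - 1) memo
      (r.1, r.2.insert (i, j) r.1)
    else
      let ra := pvGo s1 s2 (i - 1) j memo
      let rb := pvGo s1 s2 i (j - 1) ra.2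
      let rc := pvGo s1 s2 (i - 1) (j - 1) rb.2
      let r := 1 + min ra.1 (min rb.1 rc.1)
      (r, rc.2.insert (i, j) r)
termination_by i + j
decreasing_by all_goals omega

def pvLevB (s1 s2 : List Char) : Int :=
  (pvGo s1 s2 s1.length s2.length PySem.Dict.empty).1

def calculate_cost_py_alt (seq1 : String) (seq2 : String) (alphabet_to_motif : List (String × String)) : Int :=
  let d : PySem.Dict String String := PySem.Dict.mk alphabet_to_motif
  let res := (seq1.toList.zip seq2.toList).foldl
    (fun (st : Int × PySem.Dict (Char × Char) Int) cc =>
      if cc.1 = cc.2 then st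
      else
        match st.2.get? (cc.1, cc.2) with
        | some v => (st.1 + v, st.2)
        | none =>
          let m1 := if cc.1 = '-' then "" else (d.get? (pvKey cc.1)).getD ""
          let m2 := if cc.2 = '-' then "" else (d.get? (pvKey cc.2)).getD ""
          let v := pvLevB m1.toList m2.toList
          (st.1 + v, st.2.insert (cc.1, cc.2) v))
    (0, PySem.Dict.empty)
  res.1

-- ===== PRECONDITION & SPEC =====
-- Pre_ = exactly the inputs on which A returns: equal lengths (else A raises Exception) and, at every
-- mismatching position, the lowercased key of each non-gap character present in the dict (else KeyError).
def Pre_calculate_cost_py (seq1 : String) (seq2 : String) (alphabet_to_motif : List (String × String)) : Prop :=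
  seq1.toList.length = seq2.toList.length ∧
  ∀ p ∈ seq1.toList.zip seq2.toList, p.1 ≠ p.2 →
    (p.1 = '-' ∨ pvKey p.1 ∈ alphabet_to_motif.map Prod.fst) ∧
    (p.2 = '-' ∨ pvKey p.2 ∈ alphabet_to_motif.map Prod.fst)

instance (seq1 : String) (seq2 : String) (alphabet_to_motif : List (String × String)) : Decidable (Pre_calculate_cost_py seq1 seq2 alphabet_to_motif) := by unfold Pre_calculate_cost_py; infer_instance

def pvWitness_calculate_cost_py : String × String × (List (String × String)) :=
  ("AB-", "BBC", [("a", "ACT"), ("b", "A"), ("c", "")])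

def Spec_calculate_cost_py (seq1 : String) (seq2 : String) (alphabet_to_motif : List (String × String)) (out : Int) : Prop := out = calculate_cost_py_alt seq1 seq2 alphabet_to_motif
instance (seq1 : String) (seq2 : String) (alphabet_to_motif : List (String × String)) (out : Int) : Decidable (Spec_calculate_cost_py seq1 seq2 alphabet_to_motif out) := by unfold Spec_calculate_cost_py; infer_instance

-- ===== CLAIM (what is proved, stated in full; the proofs are below) =====
def Claim_equal_calculate_cost_py : Prop := ∀ (seq1 : String) (seq2 : String) (alphabet_to_motif : List (String × String)), Dom_calculate_cost_py seq1 seq2 alphabet_to_motif → Pre_calculate_cost_py seq1 seq2 alphabet_to_motif → Spec_calculate_cost_py seq1 seq2 alphabet_to_motif (calculate_cost_py seq1 seq2 alphabet_to_motif)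

-- ===== LEMMAS AND PROOFS =====

-- reference Levenshtein distance, structural on the front of both lists
def pvLev : List Char → List Char → Nat
  | [], t => t.length
  | _ :: s, [] => s.length + 1
  | a :: s, b :: t =>
    if a = b then pvLev s t
    else 1 + min (pvLev s (b :: t)) (min (pvLev (a :: s) t) (pvLev s t))

theorem pvLev_nil_right (s : List Char) : pvLev s [] = s.length := by
  cases s <;> simp [pvLev]

theorem pvLev_symm (s t : List Char) : pvLev s t = pvLev t s := by
  induction hn : s.length + t.length using Nat.strong_induction_on generalizing s t with
  | _ n ih =>
  subst hn
  cases s with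
  | nil => simp [pvLev, pvLev_nil_right]
  | cons a s =>
    cases t with
    | nil => simp [pvLev, pvLev_nil_right]
    | cons b t =>
      by_cases hab : a = b
      · subst hab
        simp only [pvLev]
        exact ih (s.length + t.length) (by simp only [List.length_cons]; omega) s t rfl
      · have hba : ¬ b = a := fun h => hab h.symm
        simp only [pvLev, if_neg hab, if_neg hba]
        have h1 := ih (s.length + (b :: t).length) (by simp only [List.length_cons]; omega) s (b :: t) rfl
        have h2 := ih ((a :: s).length + t.length) (by simp only [List.length_cons]; omega) (a :: s) t rfl
        have h3 := ih (s.length + t.length) (by simp only [List.length_cons]; omega) s t rfl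
        rw [h1, h2, h3]
        omega

-- prefix distances: pvP s t i j = distance between (first i of s) and (first j of t), via reversal
def pvP (s t : List Char) (i j : Nat) : Nat :=
  pvLev ((s.take i).reverse) ((t.take j).reverse)

theorem pvP_zero_left (s t : List Char) (j : Nat) (hj : j ≤ t.length) : pvP s t 0 j = j := by
  simp [pvP, pvLev, hj]

theorem pvP_zero_right (s t : List Char) (i : Nat) (hi : i ≤ s.length) : pvP s t i 0 = i := by
  simp [pvP, pvLev_nil_right, hi]

theorem pvTake_succ_rev (s : List Char) (i : Nat) (hi : i < s.length) :
    (s.take (i + 1)).reverse = s[i] :: (s.take i).reverse := by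
  rw [List.take_add_one]
  simp [List.getElem?_eq_getElem hi]

theorem pvP_succ_succ (s t : List Char) (i j : Nat) (hi : i < s.length) (hj : j < t.length) :
    pvP s t (i + 1) (j + 1) =
      if s[i] = t[j] then pvP s t i j
      else 1 + min (pvP s t i (j + 1)) (min (pvP s t (i + 1) j) (pvP s t i j)) := by
  unfold pvP
  rw [pvTake_succ_rev s i hi, pvTake_succ_rev t j hj]
  by_cases h : s[i] = t[j]
  · simp only [pvLev, h]
  · simp only [pvLev, if_neg h]

-- ===== A side =====
def pvRow (a b : List Char) (j : Nat) : List Int :=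
  (List.range (a.length + 1)).map (fun i => (pvP a b i j : Int))

theorem pvRow_last (a b : List Char) (j : Nat) :
    PySem.List.pyGetD (pvRow a b j) (-1) 0 = (pvP a b a.length j : Int) := by
  rw [pvRow, List.range_succ, List.map_append]
  simp only [List.map_cons, List.map_nil]
  exact PySem.List.pyGetD_neg_one_append_singleton _ _ _

theorem pvInner (a b : List Char) (j : Nat) (hj : j < b.length) :
    ∀ (m k : Nat), a.length - k = m → k ≤ a.length →
    (PySem.List.enumerate (a.drop k) (k : Int)).foldl (fun distances_ jc =>
          if jc.2 = b[j] then
            distances_ ++ [PySem.List.pyGetD (pvRow a b j) jc.1 0]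
          else
            distances_ ++ [1 + min (PySem.List.pyGetD (pvRow a b j) jc.1 0)
              (min (PySem.List.pyGetD (pvRow a b j) (jc.1 + 1) 0)
                   (PySem.List.pyGetD distances_ (-1) 0))])
        ((List.range (k + 1)).map (fun i => (pvP a b i (j + 1) : Int)))
      = pvRow a b (j + 1) := by
  intro m
  induction m with
  | zero =>
    intro k hm hk
    have hk' : k = a.length := by omega
    subst hk'
    rw [List.drop_of_length_le (le_refl _), PySem.List.enumerate_nil, List.foldl_nil, pvRow]
  | succ m ih =>
    intro k hm hk
    have hklt : k < a.length := by omega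
    rw [List.drop_eq_getElem_cons hklt, PySem.List.enumerate_cons, List.foldl_cons]
    have e1 : PySem.List.pyGetD (pvRow a b j) (k : Int) 0 = (pvP a b k j : Int) := by
      rw [PySem.List.pyGetD_natCast, pvRow, PySem.List.getD_map_range _ _ _ _ (by omega)]
    have e2 : PySem.List.pyGetD (pvRow a b j) ((k : Int) + 1) 0 = (pvP a b (k + 1) j : Int) := by
      have hcast : ((k : Int) + 1) = ((k + 1 : Nat) : Int) := by push_cast; ring
      rw [hcast, PySem.List.pyGetD_natCast, pvRow, PySem.List.getD_map_range _ _ _ _ (by omega)]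
    have e3 : PySem.List.pyGetD ((List.range (k + 1)).map (fun i => (pvP a b i (j + 1) : Int))) (-1) 0
        = (pvP a b k (j + 1) : Int) := by
      rw [List.range_succ, List.map_append]
      simp only [List.map_cons, List.map_nil]
      exact PySem.List.pyGetD_neg_one_append_singleton _ _ _
    have hstep : (if a[k] = b[j] then
          ((List.range (k + 1)).map (fun i => (pvP a b i (j + 1) : Int))) ++
            [PySem.List.pyGetD (pvRow a b j) (k : Int) 0]
        else
          ((List.range (k + 1)).map (fun i => (pvP a b i (j + 1) : Int))) ++
            [1 + min (PySem.List.pyGetD (pvRow a b j) (k : Int) 0)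
              (min (PySem.List.pyGetD (pvRow a b j) ((k : Int) + 1) 0)
                   (PySem.List.pyGetD ((List.range (k + 1)).map (fun i => (pvP a b i (j + 1) : Int))) (-1) 0))])
        = (List.range (k + 1 + 1)).map (fun i => (pvP a b i (j + 1) : Int)) := by
      rw [e1, e2, e3, List.range_succ (n := k + 1), List.map_append]
      simp only [List.map_cons, List.map_nil]
      rw [pvP_succ_succ a b k j hklt hj]
      by_cases hc : a[k] = b[j]
      · simp [hc]
      · simp only [if_neg hc, List.append_cancel_left_eq, List.cons.injEq, and_true]
        push_cast
        omega
    rw [hstep]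
    have hcast : ((k : Int) + 1) = ((k + 1 : Nat) : Int) := by push_cast; ring
    rw [hcast]
    exact ih (k + 1) (by omega) (by omega)

theorem pvOuter (a b : List Char) : ∀ (m j : Nat), b.length - j = m → j ≤ b.length →
    (PySem.List.enumerate (b.drop j) (j : Int)).foldl (fun distances ic =>
      (PySem.List.enumerate a).foldl (fun distances_ jc =>
          if jc.2 = ic.2 then
            distances_ ++ [PySem.List.pyGetD distances jc.1 0]
          else
            distances_ ++ [1 + min (PySem.List.pyGetD distances jc.1 0)
              (min (PySem.List.pyGetD distances (jc.1 + 1) 0)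
                   (PySem.List.pyGetD distances_ (-1) 0))])
        [ic.1 + 1]) (pvRow a b j) = pvRow a b b.length := by
  intro m
  induction m with
  | zero =>
    intro j hm hj
    have : j = b.length := by omega
    subst this
    rw [List.drop_of_length_le (le_refl _), PySem.List.enumerate_nil, List.foldl_nil]
  | succ m ih =>
    intro j hm hj
    have hjlt : j < b.length := by omega
    rw [List.drop_eq_getElem_cons hjlt, PySem.List.enumerate_cons, List.foldl_cons]
    have hinit : [(j : Int) + 1] = (List.range (0 + 1)).map (fun i => (pvP a b i (j + 1) : Int)) := by
      simp [pvP_zero_left a b (j + 1) (by omega)]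
    have hin := pvInner a b j hjlt a.length 0 (by omega) (by omega)
    rw [hinit]
    have hdrop0 : a.drop 0 = a := by simp
    rw [show ((0 : Nat) : Int) = 0 from rfl, hdrop0] at hin
    rw [hin]
    have : ((j : Int) + 1) = ((j + 1 : Nat) : Int) := by push_cast; ring
    rw [this]
    exact ih (j + 1) (by omega) (by omega)

theorem pvLevA_eq (s1 s2 : List Char) : pvLevA s1 s2 = (pvLev s1.reverse s2.reverse : Int) := by
  unfold pvLevA
  by_cases h : s1.length > s2.length
  · simp only [if_pos h]
    have hinit : (List.range (s2.length + 1)).map (fun i => Int.ofNat i)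
        = pvRow s2 s1 0 := by
      rw [pvRow]
      apply List.map_congr_left
      intro i hi
      simp [pvP_zero_right s2 s1 i (by simp at hi; omega)]
    have hout := pvOuter s2 s1 s1.length 0 (by omega) (by omega)
    simp only [List.drop_zero, Nat.cast_zero] at hout
    simp only [hinit, hout, pvRow_last]
    unfold pvP
    rw [List.take_length, List.take_length, pvLev_symm]
  · simp only [if_neg h]
    have hinit : (List.range (s1.length + 1)).map (fun i => Int.ofNat i)
        = pvRow s1 s2 0 := by
      rw [pvRow]
      apply List.map_congr_left
      intro i hi
      simp [pvP_zero_right s1 s2 i (by simp at hi; omega)]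
    have hout := pvOuter s1 s2 s2.length 0 (by omega) (by omega)
    simp only [List.drop_zero, Nat.cast_zero] at hout
    simp only [hinit, hout, pvRow_last]
    unfold pvP
    rw [List.take_length, List.take_length]



-- ===== B side =====
def pvGood (s1 s2 : List Char) (memo : PySem.Dict (Nat × Nat) Int) : Prop :=
  ∀ (i j : Nat) (v : Int), memo.get? (i, j) = some v →
    i ≤ s1.length → j ≤ s2.length → v = (pvP s1 s2 i j : Int)

theorem pvGood_insert (s1 s2 : List Char) (memo : PySem.Dict (Nat × Nat) Int)
    (h : pvGood s1 s2 memo) (i j : Nat) (v : Int)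
    (hv : i ≤ s1.length → j ≤ s2.length → v = (pvP s1 s2 i j : Int)) :
    pvGood s1 s2 (memo.insert (i, j) v) := by
  intro i' j' w hw hi' hj'
  rw [PySem.Dict.get?_insert] at hw
  split at hw
  · rename_i heq
    obtain ⟨h1, h2⟩ := Prod.mk.injEq .. ▸ heq
    cases hw
    subst h1 h2
    exact hv hi' hj'
  · exact h i' j' w hw hi' hj'

theorem pvGo_spec (s1 s2 : List Char) (n : Nat) : ∀ (i j : Nat), i + j ≤ n →
    i ≤ s1.length → j ≤ s2.length → ∀ memo, pvGood s1 s2 memo →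
    (pvGo s1 s2 i j memo).1 = (pvP s1 s2 i j : Int) ∧ pvGood s1 s2 (pvGo s1 s2 i j memo).2 := by
  induction n with
  | zero =>
    intro i j hn hi hj memo hm
    have hi0 : i = 0 := by omega
    have hj0 : j = 0 := by omega
    subst hi0 hj0
    rw [pvGo]
    cases hg : memo.get? (0, 0) with
    | some v =>
      refine ⟨?_, hm⟩
      rw [hm 0 0 v hg (by omega) (by omega)]
    | none =>
      simp only [reduceDIte]
      constructor
      · rw [pvP_zero_left _ _ _ hj]
      · exact pvGood_insert _ _ _ hm _ _ _ (fun _ _ => by rw [pvP_zero_left _ _ _ hj])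
  | succ n ih =>
    intro i j hn hi hj memo hm
    rw [pvGo]
    cases hg : memo.get? (i, j) with
    | some v =>
      exact ⟨hm i j v hg hi hj, hm⟩
    | none =>
      by_cases hi0 : i = 0
      · subst hi0
        simp only [reduceDIte]
        refine ⟨by rw [pvP_zero_left _ _ _ hj], ?_⟩
        exact pvGood_insert _ _ _ hm _ _ _ (fun _ _ => by rw [pvP_zero_left _ _ _ hj])
      · by_cases hj0 : j = 0
        · subst hj0
          simp only [dif_neg hi0, reduceDIte]
          refine ⟨by rw [pvP_zero_right _ _ _ hi], ?_⟩
          exact pvGood_insert _ _ _ hm _ _ _ (fun _ _ => by rw [pvP_zero_right _ _ _ hi])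
        · simp only [dif_neg hi0, dif_neg hj0]
          obtain ⟨i', rfl⟩ : ∃ i', i = i' + 1 := ⟨i - 1, by omega⟩
          obtain ⟨j', rfl⟩ : ∃ j', j = j' + 1 := ⟨j - 1, by omega⟩
          have hi' : i' < s1.length := by omega
          have hj' : j' < s2.length := by omega
          have hch1 : s1.getD (i' + 1 - 1) ' ' = s1[i'] := by
            simp [List.getD_eq_getElem?_getD, List.getElem?_eq_getElem hi']
          have hch2 : s2.getD (j' + 1 - 1) ' ' = s2[j'] := by
            simp [List.getD_eq_getElem?_getD, List.getElem?_eq_getElem hj']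
          rw [hch1, hch2]
          by_cases hc : s1[i'] = s2[j']
          · simp only [if_pos hc]
            have hrec := ih i' j' (by omega) (by omega) (by omega) memo hm
            refine ⟨?_, ?_⟩
            · simp only [Nat.add_sub_cancel]
              rw [hrec.1, pvP_succ_succ _ _ _ _ hi' hj', if_pos hc]
            · exact pvGood_insert _ _ _ hrec.2 _ _ _ (fun _ _ => by
                simp only [Nat.add_sub_cancel]
                rw [hrec.1, pvP_succ_succ _ _ _ _ hi' hj', if_pos hc])
          · simp only [if_neg hc]
            simp only [Nat.add_sub_cancel]
            have h1 := ih i' (j' + 1) (by omega) (by omega) (by omega) memo hm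
            have h2 := ih (i' + 1) j' (by omega) (by omega) (by omega) _ h1.2
            have h3 := ih i' j' (by omega) (by omega) (by omega) _ h2.2
            have hval : (1 : Int) + min (pvGo s1 s2 i' (j' + 1) memo).1
                (min (pvGo s1 s2 (i' + 1) j' (pvGo s1 s2 i' (j' + 1) memo).2).1
                     (pvGo s1 s2 i' j' (pvGo s1 s2 (i' + 1) j' (pvGo s1 s2 i' (j' + 1) memo).2).2).1)
                = (pvP s1 s2 (i' + 1) (j' + 1) : Int) := by
              rw [h1.1, h2.1, h3.1, pvP_succ_succ _ _ _ _ hi' hj', if_neg hc]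
              push_cast
              omega
            exact ⟨hval, pvGood_insert _ _ _ h3.2 _ _ _ (fun _ _ => hval)⟩

theorem pvLevB_eq (s1 s2 : List Char) : pvLevB s1 s2 = (pvLev s1.reverse s2.reverse : Int) := by
  have hem : pvGood s1 s2 PySem.Dict.empty := by
    intro i j v hv
    rw [PySem.Dict.get?_empty] at hv
    cases hv
  have h := (pvGo_spec s1 s2 (s1.length + s2.length) s1.length s2.length le_rfl le_rfl le_rfl
    PySem.Dict.empty hem).1
  rw [pvLevB, h, pvP, List.take_length, List.take_length]

theorem pvLevA_eq_pvLevB (s1 s2 : List Char) : pvLevA s1 s2 = pvLevB s1 s2 := by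
  rw [pvLevA_eq, pvLevB_eq]

theorem pvLevB_nil_left (l : List Char) : pvLevB [] l = (l.length : Int) := by
  rw [pvLevB_eq]
  simp [pvLev]

theorem pvLevB_nil_right (l : List Char) : pvLevB l [] = (l.length : Int) := by
  rw [pvLevB_eq]
  simp [pvLev_nil_right]

-- ===== outer loops =====
def pvPair (d : PySem.Dict String String) (c1 c2 : Char) : Int :=
  pvLevB (if c1 = '-' then "" else (d.get? (pvKey c1)).getD "").toList
         (if c2 = '-' then "" else (d.get? (pvKey c2)).getD "").toList

theorem pvMapRangeZip (l1 : List Char) : ∀ (l2 : List Char) (g : Char → Char → Int),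
    l1.length = l2.length →
    (List.range l1.length).map (fun i => g (l1.getD i ' ') (l2.getD i ' '))
      = (l1.zip l2).map (fun p => g p.1 p.2) := by
  induction l1 with
  | nil => intro l2 g h; simp
  | cons x t1 ih =>
    intro l2 g h
    cases l2 with
    | nil => simp at h
    | cons y t2 =>
      simp only [List.length_cons, List.range_succ_eq_map, List.map_cons, List.map_map,
        List.zip_cons_cons, List.getD_cons_zero]
      congr 1
      have := ih t2 (fun a b => g a b) (by simpa using h)
      simpa [Function.comp] using this

def pvStepA (d : PySem.Dict String String) (c1 c2 : Char) : Int :=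
  if c1 ≠ c2 then
    if c1 ≠ '-' ∧ c2 ≠ '-' then
      pvLevA ((d.get? (pvKey c1)).getD "").toList ((d.get? (pvKey c2)).getD "").toList
    else if c1 = '-' then (((d.get? (pvKey c2)).getD "").toList.length : Int)
    else (((d.get? (pvKey c1)).getD "").toList.length : Int)
  else 0

theorem pvStepA_eq_pair (d : PySem.Dict String String) (c1 c2 : Char) :
    pvStepA d c1 c2 = if c1 = c2 then 0 else pvPair d c1 c2 := by
  unfold pvStepA pvPair
  by_cases h : c1 = c2
  · simp [h]
  · rw [if_neg h, if_pos h]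
    by_cases h1 : c1 = '-'
    · have h2 : ¬ c2 = '-' := by rw [h1] at h; exact fun hc => h hc.symm
      rw [if_pos h1, if_neg h2, if_neg (by tauto : ¬ (c1 ≠ '-' ∧ c2 ≠ '-')), if_pos h1]
      rw [show ("" : String).toList = [] from rfl, pvLevB_nil_left]
    · by_cases h2 : c2 = '-'
      · rw [if_neg h1, if_pos h2, if_neg (by tauto : ¬ (c1 ≠ '-' ∧ c2 ≠ '-')), if_neg h1]
        rw [show ("" : String).toList = [] from rfl, pvLevB_nil_right]
      · rw [if_pos (by tauto : (c1 ≠ '-' ∧ c2 ≠ '-')), if_neg h1, if_neg h2]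
        exact pvLevA_eq_pvLevB _ _

theorem calculate_cost_py_eq_sum (seq1 seq2 : String) (atm : List (String × String))
    (h : seq1.toList.length = seq2.toList.length) :
    calculate_cost_py seq1 seq2 atm =
      ((seq1.toList.zip seq2.toList).map (fun p =>
        if p.1 = p.2 then 0 else pvPair (PySem.Dict.mk atm) p.1 p.2)).sum := by
  have hfun : (fun (cost : Int) (i : Nat) =>
      let c1 := seq1.toList.getD i ' '
      let c2 := seq2.toList.getD i ' '
      if c1 ≠ c2 then
        if c1 ≠ '-' ∧ c2 ≠ '-' then
          cost + pvLevA (((PySem.Dict.mk atm).get? (pvKey c1)).getD "").toList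
            (((PySem.Dict.mk atm).get? (pvKey c2)).getD "").toList
        else if c1 = '-' then
          cost + ((((PySem.Dict.mk atm).get? (pvKey c2)).getD "").toList.length : Int)
        else
          cost + ((((PySem.Dict.mk atm).get? (pvKey c1)).getD "").toList.length : Int)
      else cost)
      = (fun (cost : Int) (i : Nat) =>
          cost + pvStepA (PySem.Dict.mk atm) (seq1.toList.getD i ' ') (seq2.toList.getD i ' ')) := by
    funext cost i
    simp only [pvStepA]
    split_ifs <;> ring
  show (List.range seq1.toList.length).foldl _ 0 = _
  rw [hfun, PySem.List.foldl_add, zero_add,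
    pvMapRangeZip seq1.toList seq2.toList _ h]
  congr 1
  apply List.map_congr_left
  intro p _
  exact pvStepA_eq_pair _ _ _

theorem pvBfold (d : PySem.Dict String String) (l : List (Char × Char)) :
    ∀ (t : Int) (cache : PySem.Dict (Char × Char) Int),
    (∀ c1 c2 v, cache.get? (c1, c2) = some v → v = pvPair d c1 c2) →
    (l.foldl (fun (st : Int × PySem.Dict (Char × Char) Int) cc =>
      if cc.1 = cc.2 then st
      else
        match st.2.get? (cc.1, cc.2) with
        | some v => (st.1 + v, st.2)
        | none =>
          let m1 := if cc.1 = '-' then "" else (d.get? (pvKey cc.1)).getD ""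
          let m2 := if cc.2 = '-' then "" else (d.get? (pvKey cc.2)).getD ""
          let v := pvLevB m1.toList m2.toList
          (st.1 + v, st.2.insert (cc.1, cc.2) v)) (t, cache)).1
    = t + (l.map (fun p => if p.1 = p.2 then 0 else pvPair d p.1 p.2)).sum := by
  induction l with
  | nil => intro t cache _; simp
  | cons p l ih =>
    intro t cache h
    rw [List.foldl_cons]
    by_cases hp : p.1 = p.2
    · simp only [if_pos hp]
      rw [ih t cache h]
      simp [hp]
    · simp only [if_neg hp]
      cases hg : cache.get? (p.1, p.2) with
      | some v =>
        rw [ih (t + v) cache h, h p.1 p.2 v hg]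
        simp only [List.map_cons, List.sum_cons, if_neg hp]
        ring
      | none =>
        have h' : ∀ c1 c2 v',
            ((cache.insert (p.1, p.2)
              (pvLevB (if p.1 = '-' then "" else (d.get? (pvKey p.1)).getD "").toList
                      (if p.2 = '-' then "" else (d.get? (pvKey p.2)).getD "").toList)).get? (c1, c2))
              = some v' → v' = pvPair d c1 c2 := by
          intro c1 c2 v' hv
          rw [PySem.Dict.get?_insert] at hv
          split at hv
          · rename_i heq
            cases hv
            have h1 : c1 = p.1 := congrArg Prod.fst heq
            have h2 : c2 = p.2 := congrArg Prod.snd heq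
            subst h1 h2
            rfl
          · exact h c1 c2 v' hv
        rw [ih _ _ h']
        simp only [List.map_cons, List.sum_cons, if_neg hp, pvPair]
        ring
    
theorem calculate_cost_py_alt_eq_sum (seq1 seq2 : String) (atm : List (String × String)) :
    calculate_cost_py_alt seq1 seq2 atm =
      ((seq1.toList.zip seq2.toList).map (fun p =>
        if p.1 = p.2 then 0 else pvPair (PySem.Dict.mk atm) p.1 p.2)).sum := by
  have hem : ∀ c1 c2 v, (PySem.Dict.empty : PySem.Dict (Char × Char) Int).get? (c1, c2) = some v →
      v = pvPair (PySem.Dict.mk atm) c1 c2 := by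
    intro c1 c2 v hv
    rw [PySem.Dict.get?_empty] at hv
    cases hv
  show ((seq1.toList.zip seq2.toList).foldl _ (0, PySem.Dict.empty)).1 = _
  rw [pvBfold (PySem.Dict.mk atm) (seq1.toList.zip seq2.toList) 0 PySem.Dict.empty hem, zero_add]

-- ===== VERDICT (by name: the statement is the Claim_ definition above) =====
theorem calculate_cost_py_spec : Claim_equal_calculate_cost_py := by
  intro seq1 seq2 atm _hd hpre
  unfold Spec_calculate_cost_py
  rw [calculate_cost_py_eq_sum seq1 seq2 atm hpre.1, calculate_cost_py_alt_eq_sum]
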